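-- pv_equiv track=rewrite | github.com/shamystic/generate-teams | make_groups.py | assign_topic
-- ===== SOURCE A (Python) =====
-- from collections import Counter
--
-- def assign_topic(group_topic):
-- 	# Return the top-most topic that is liked by the most subgroups in the group.
-- 	group_topic = list(group_topic)
-- 	most_common = Counter(group_topic).most_common(1)[0][0]
-- 	top_topics = Counter(group_topic).most_common(3)
-- 	topic_vals = [a[0] for a in Counter(group_topic).most_common(3)]
-- 	if top_topics[0][1] == top_topics[1][1]:
-- 		# Need to break ties
-- 		prefs_chunks = list(chunks(group_topic, 3))
-- 		index_sums = {}
-- 		for i in range(len(group_topic)):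
-- 			topic = group_topic[i]
-- 			index_sums[group_topic[i]] = sum([chunk.index(topic) if topic in chunk else 0 for chunk in prefs_chunks])
-- 		return min(topic_vals, key=index_sums.get)
-- 	else:
-- 		return most_common
--
-- def chunks(lst, n):
--     """Yield successive n-sized chunks from lst."""
--     for i in range(0, len(lst), n):
--         yield lst[i:i + n]
-- ===== SOURCE B (Python) =====
-- from collections import Counter
--
-- def assign_topic(group_topic):
--     lst = list(group_topic)
--     counts = Counter(lst)
--     rank = {t: i for i, t in enumerate(counts)}
--     order = sorted(counts, key=lambda t: (-counts[t], rank[t]))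
--     if counts[order[0]] == counts[order[1]]:
--         sums = {}
--         for start in range(0, len(lst), 3):
--             chunk = lst[start:start + 3]
--             for j, t in enumerate(chunk):
--                 if t not in chunk[:j]:
--                     sums[t] = sums.get(t, 0) + j
--         return min(order[:3], key=lambda t: sums[t])
--     return order[0]
-- ===== Notes on version B (the rewrite author's own statement) =====
-- stated objective: alternative
-- what changed: B builds the counts once with Counter, derives each topic's first-seen rank from the dict's insertion order, sorts the distinct topics once by (-count, rank), and on a tie accumulates the per-topic chunk index sums in a single pass over the chunks, instead of A's three Counter constructions and, on ties, a loop that recomputes every chunk's index scan for each element.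
import Mathlib
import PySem

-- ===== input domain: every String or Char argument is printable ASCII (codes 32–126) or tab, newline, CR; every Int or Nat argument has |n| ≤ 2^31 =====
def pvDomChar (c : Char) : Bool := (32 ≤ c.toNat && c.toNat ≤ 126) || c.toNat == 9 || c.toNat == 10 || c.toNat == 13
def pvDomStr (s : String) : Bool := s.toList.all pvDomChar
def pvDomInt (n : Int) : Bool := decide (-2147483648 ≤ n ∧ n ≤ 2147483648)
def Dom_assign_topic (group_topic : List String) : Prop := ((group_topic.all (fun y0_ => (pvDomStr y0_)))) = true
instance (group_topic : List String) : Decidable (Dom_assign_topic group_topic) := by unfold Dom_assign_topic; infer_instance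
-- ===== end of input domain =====

-- B builds the counts once, ranks topics by first occurrence from the dict's insertion
-- order, sorts the distinct topics once by (-count, rank), and on a tie accumulates the
-- per-topic chunk index sums in a single pass over the chunks (objective: alternative).

-- ===== PORT A =====
-- helper `chunks(lst, n)` (generator of successive n-sized slices), materialised as a list
def pyChunks (lst : List String) (n : Int) : List (List String) :=
  (PySem.List.pyRange 0 (PySem.List.len lst) n).map
    (fun i => PySem.List.slice lst (some i) (some (i + n)))

def assign_topic (group_topic : List String) : String :=
  let gt := group_topic
  -- Counter(...).most_common(k) = stable sort of the counter items by count, descending, then take k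
  let most_common :=
    ((PySem.List.pyGet? ((PySem.List.sorted (PySem.Dict.counter gt).items (fun a => a.2) true).take 1) 0).getD ("", 0)).1
  let top_topics := (PySem.List.sorted (PySem.Dict.counter gt).items (fun a => a.2) true).take 3
  let topic_vals := ((PySem.List.sorted (PySem.Dict.counter gt).items (fun a => a.2) true).take 3).map (fun a => a.1)
  -- `[0]`/`[1]` raise IndexError when fewer than two distinct topics exist: excluded by Pre_
  if ((PySem.List.pyGet? top_topics 0).getD ("", 0)).2 == ((PySem.List.pyGet? top_topics 1).getD ("", 0)).2 then
    let prefs_chunks := pyChunks gt 3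
    let index_sums :=
      (PySem.List.pyRange 0 (PySem.List.len gt)).foldl
        (fun (d : PySem.Dict String Int) i =>
          let topic := PySem.List.pyGetD gt i ""   -- i always in range, default never used
          d.insert topic
            ((prefs_chunks.map (fun chunk =>
               if chunk.contains topic then (((PySem.List.index? chunk topic).getD 0 : Nat) : Int) else 0)).sum))
        PySem.Dict.empty
    -- key=index_sums.get: every candidate occurs in group_topic hence in index_sums, so `.getD _ 0` is exact
    (PySem.List.min? topic_vals (fun t => index_sums.getD t 0)).getD ""
  else most_common

-- ===== PORT B =====
def assign_topic_alt (group_topic : List String) : String :=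
  let lst := group_topic
  let counts := PySem.Dict.counter lst
  let rank := (PySem.List.enumerate counts.keys).foldl
    (fun (d : PySem.Dict String Int) it => d.insert it.2 it.1) PySem.Dict.empty
  let order := PySem.List.sorted2 counts.keys (fun t => -(counts.getD t 0)) (fun t => rank.getD t 0)
  -- `order[1]` raises IndexError when fewer than two distinct topics exist: excluded by Pre_
  let o0 := (PySem.List.pyGet? order 0).getD ""
  let o1 := (PySem.List.pyGet? order 1).getD ""
  if counts.getD o0 0 == counts.getD o1 0 then
    let sums := (PySem.List.pyRange 0 (PySem.List.len lst) 3).foldl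
      (fun (d : PySem.Dict String Int) start =>
        let chunk := PySem.List.slice lst (some start) (some (start + 3))
        (PySem.List.enumerate chunk).foldl
          (fun (d : PySem.Dict String Int) jt =>
            if (PySem.List.slice chunk none (some jt.1)).contains jt.2 then d
            else d.insert jt.2 (d.getD jt.2 0 + jt.1)) d)
      PySem.Dict.empty
    (PySem.List.min? (order.take 3) (fun t => sums.getD t 0)).getD ""
  else o0

-- ===== PRECONDITION & SPEC =====
-- Pre_ excludes exactly the inputs with fewer than two distinct topics, on which A raises IndexError.
def Pre_assign_topic (group_topic : List String) : Prop :=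
  2 ≤ (PySem.Set.ofList group_topic).length
instance (group_topic : List String) : Decidable (Pre_assign_topic group_topic) := by
  unfold Pre_assign_topic; infer_instance

def pvWitness_assign_topic : List String := ["a", "b"]

def Spec_assign_topic (group_topic : List String) (out : String) : Prop := out = assign_topic_alt group_topic
instance (group_topic : List String) (out : String) : Decidable (Spec_assign_topic group_topic out) := by
  unfold Spec_assign_topic; infer_instance

-- ===== CLAIM (what is proved, stated in full; the proofs are below) =====
def Claim_equal_assign_topic : Prop := ∀ (group_topic : List String), Dom_assign_topic group_topic → Pre_assign_topic group_topic → Spec_assign_topic group_topic (assign_topic group_topic)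

-- ===== LEMMAS AND PROOFS =====

def pvS (gt : List String) (t : String) : Int :=
  ((pyChunks gt 3).map (fun chunk =>
    if chunk.contains t then (((PySem.List.index? chunk t).getD 0 : Nat) : Int) else 0)).sum

theorem pv_foldl_insert_const (l : List String) (v : String → Int) (d : PySem.Dict String Int) (t : String) :
    (l.foldl (fun d x => d.insert x (v x)) d).getD t 0 = if t ∈ l then v t else d.getD t 0 := by
  induction l generalizing d with
  | nil => simp
  | cons x xs ih =>
      simp only [List.foldl_cons, ih, List.mem_cons]
      by_cases hx : t = x
      · subst hx; simp
      · by_cases hm : t ∈ xs <;> simp [hm, hx, PySem.Dict.getD_insert_of_ne _ _ _ hx]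


theorem pv_S_of_not_mem (gt : List String) (t : String) (h : t ∉ gt) : pvS gt t = 0 := by
  unfold pvS
  apply List.sum_eq_zero
  intro x hx
  simp only [List.mem_map] at hx
  obtain ⟨chunk, hc, rfl⟩ := hx
  have hsub : t ∉ chunk := by
    simp only [pyChunks, List.mem_map] at hc
    obtain ⟨i, _, rfl⟩ := hc
    intro hy
    simp only [PySem.List.slice] at hy
    exact h (List.mem_of_mem_drop (List.mem_of_mem_take hy))
  simp [hsub]

theorem pv_chunk_len (lst : List String) (i : Int) (hi : 0 ≤ i) :
    (PySem.List.slice lst (some i) (some (i + 3))).length ≤ 3 := by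
  have h3 : ¬ (i + 3 < 0) := by omega
  have h0 : ¬ (i < 0) := by omega
  simp only [PySem.List.slice, PySem.List.clampIdx, if_neg h0, if_neg h3, List.length_take,
    List.length_drop]
  omega

theorem pv_pairwise_idxOf (l : List String) (h : l.Nodup) :
    l.Pairwise (fun a b => l.idxOf a < l.idxOf b) := by
  rw [List.pairwise_iff_getElem]
  intro i j hi hj hij
  rw [List.Nodup.idxOf_getElem h i hi, List.Nodup.idxOf_getElem h j hj]
  exact hij

theorem pv_pyGet0 {α : Type} (x : α) (xs : List α) : PySem.List.pyGet? (x :: xs) 0 = some x := by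
  rw [show (0:ℤ) = ((0:ℕ):ℤ) from rfl, PySem.List.pyGet?_natCast]; rfl

theorem pv_pyGet1 {α : Type} (x y : α) (xs : List α) : PySem.List.pyGet? (x :: y :: xs) 1 = some y := by
  rw [show (1:ℤ) = ((1:ℕ):ℤ) from rfl, PySem.List.pyGet?_natCast]; rfl

theorem pv_insertBy_map (c r : String → Int) (x : String) (acc : List String)
    (h : ∀ y ∈ acc, r y < r x) :
    PySem.List.insertBy (fun p q => decide (q.2 < p.2)) ((x, c x) : String × Int)
        (acc.map (fun k => (k, c k)))
      = (PySem.List.insertBy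
          (fun a b => decide (-(c a) < -(c b)) || (!decide (-(c b) < -(c a)) && decide (r a < r b)))
          x acc).map (fun k => (k, c k)) := by
  induction acc with
  | nil => simp [PySem.List.insertBy]
  | cons y ys ih =>
      have hy : r y < r x := h y (by simp)
      have hrx : decide (r x < r y) = false := by simp; omega
      simp only [List.map_cons, PySem.List.insertBy, hrx]
      by_cases hc : c y < c x
      · have h1 : decide (c y < c x) = true := by simp [hc]
        have h2 : decide (-(c x) < -(c y)) = true := by simp; omega
        simp [h1]
      · have h1 : decide (c y < c x) = false := by simp [hc]
        have h2 : decide (-(c x) < -(c y)) = false := by simp; omega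
        simp only [h1, h2, Bool.and_false, Bool.false_or, if_neg, Bool.false_eq_true,
          not_false_iff]
        rw [ih (fun z hz => h z (by simp [hz]))]
        simp

theorem pv_sort_fold (c r : String → Int) :
    ∀ (rest accB : List String),
      rest.Pairwise (fun a b => r a < r b) →
      (∀ y ∈ accB, ∀ x ∈ rest, r y < r x) →
      rest.foldl (fun acc k => PySem.List.insertBy (fun p q => decide (q.2 < p.2)) ((k, c k) : String × Int) acc)
          (accB.map (fun k => (k, c k)))
        = (rest.foldl (fun acc x => PySem.List.insertBy
            (fun a b => decide (-(c a) < -(c b)) || (!decide (-(c b) < -(c a)) && decide (r a < r b))) x acc)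
            accB).map (fun k => (k, c k))
  | [], accB, _, _ => rfl
  | x :: rest, accB, hp, hacc => by
      simp only [List.foldl_cons]
      rw [pv_insertBy_map c r x accB (fun y hy => hacc y hy x (by simp))]
      refine pv_sort_fold c r rest _ (List.pairwise_cons.1 hp).2 ?_
      intro y hy x' hx'
      rcases (PySem.List.mem_insertBy _ x y accB).1 hy with rfl | hmem
      · exact (List.pairwise_cons.1 hp).1 x' hx'
      · exact hacc y hmem x' (by simp [hx'])

theorem pv_sort_eq (c r : String → Int) (keys : List String)
    (hr : keys.Pairwise (fun a b => r a < r b)) :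
    PySem.List.sorted (keys.map (fun k => (k, c k))) (fun a => a.2) true
      = (PySem.List.sorted2 keys (fun k => -(c k)) r).map (fun k => (k, c k)) := by
  simp only [PySem.List.sorted, PySem.List.sorted2, if_neg (by decide : ¬ (false = true))]
  rw [List.foldl_map]
  have := pv_sort_fold c r keys [] hr (by simp)
  simpa using this

set_option maxHeartbeats 1000000 in
theorem pv_B_chunk (ch : List String) (hch : ch.length ≤ 3) (d : PySem.Dict String Int) (t : String) :
    ((PySem.List.enumerate ch).foldl
        (fun (d : PySem.Dict String Int) jt =>
          if (PySem.List.slice ch none (some jt.1)).contains jt.2 then d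
          else d.insert jt.2 (d.getD jt.2 0 + jt.1)) d).getD t 0
      = d.getD t 0 + (if ch.contains t then (((PySem.List.index? ch t).getD 0 : Nat) : Int) else 0) := by
  rcases ch with _ | ⟨a, _ | ⟨b, _ | ⟨c, _ | ⟨e, tl⟩⟩⟩⟩
  · simp [PySem.List.enumerate]
  · simp only [PySem.List.enumerate, PySem.List.slice, PySem.List.clampIdx,
      PySem.List.index?_eq_idxOf?, List.idxOf?, List.findIdx?_cons, List.findIdx?_nil]
    norm_num
    by_cases hta : t = a <;> simp_all [PySem.Dict.getD_insert]
  · simp only [PySem.List.enumerate, PySem.List.slice, PySem.List.clampIdx,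
      PySem.List.index?_eq_idxOf?, List.idxOf?, List.findIdx?_cons, List.findIdx?_nil]
    norm_num
    by_cases hab : a = b <;> by_cases hta : t = a <;> by_cases htb : t = b <;>
      simp_all [PySem.Dict.getD_insert] <;> simp_all [eq_comm, PySem.Dict.getD_insert]
  · simp only [PySem.List.enumerate, PySem.List.slice, PySem.List.clampIdx,
      PySem.List.index?_eq_idxOf?, List.idxOf?, List.findIdx?_cons, List.findIdx?_nil]
    norm_num
    by_cases hba : b = a <;> by_cases hca : c = a <;> by_cases hcb : c = b <;>
      by_cases hta : t = a <;> by_cases htb : t = b <;> by_cases htc : t = c <;>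
        simp_all [PySem.Dict.getD_insert] <;> simp_all [eq_comm]
  · simp at hch; omega

theorem pv_chunks_fold (t : String) :
    ∀ (chs : List (List String)) (d : PySem.Dict String Int), (∀ ch ∈ chs, ch.length ≤ 3) →
      (chs.foldl (fun (d : PySem.Dict String Int) chunk =>
          (PySem.List.enumerate chunk).foldl
            (fun (d : PySem.Dict String Int) jt =>
              if (PySem.List.slice chunk none (some jt.1)).contains jt.2 then d
              else d.insert jt.2 (d.getD jt.2 0 + jt.1)) d) d).getD t 0
        = d.getD t 0 + (chs.map (fun chunk =>
            if chunk.contains t then (((PySem.List.index? chunk t).getD 0 : Nat) : Int) else 0)).sum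
  | [], d, _ => by simp
  | ch :: chs, d, h => by
      simp only [List.foldl_cons, List.map_cons, List.sum_cons]
      rw [pv_chunks_fold t chs _ (fun c hc => h c (by simp [hc]))]
      rw [pv_B_chunk ch (h ch (by simp)) d t]
      ring

theorem pv_B_sums (lst : List String) (t : String) :
    (((PySem.List.pyRange 0 (PySem.List.len lst) 3).foldl
      (fun (d : PySem.Dict String Int) start =>
        let chunk := PySem.List.slice lst (some start) (some (start + 3))
        (PySem.List.enumerate chunk).foldl
          (fun (d : PySem.Dict String Int) jt =>
            if (PySem.List.slice chunk none (some jt.1)).contains jt.2 then d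
            else d.insert jt.2 (d.getD jt.2 0 + jt.1)) d)
      PySem.Dict.empty).getD t 0) = pvS lst t := by
  have hfold : (PySem.List.pyRange 0 (PySem.List.len lst) 3).foldl
      (fun (d : PySem.Dict String Int) start =>
        let chunk := PySem.List.slice lst (some start) (some (start + 3))
        (PySem.List.enumerate chunk).foldl
          (fun (d : PySem.Dict String Int) jt =>
            if (PySem.List.slice chunk none (some jt.1)).contains jt.2 then d
            else d.insert jt.2 (d.getD jt.2 0 + jt.1)) d)
      PySem.Dict.empty
      = (pyChunks lst 3).foldl (fun (d : PySem.Dict String Int) chunk =>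
          (PySem.List.enumerate chunk).foldl
            (fun (d : PySem.Dict String Int) jt =>
              if (PySem.List.slice chunk none (some jt.1)).contains jt.2 then d
              else d.insert jt.2 (d.getD jt.2 0 + jt.1)) d) PySem.Dict.empty := by
    rw [pyChunks, List.foldl_map]
  rw [hfold, pv_chunks_fold t (pyChunks lst 3) PySem.Dict.empty ?hlen, PySem.Dict.getD_empty]
  · rw [pvS]; ring
  case hlen =>
    intro ch hc
    simp only [pyChunks, List.mem_map] at hc
    obtain ⟨i, hi, rfl⟩ := hc
    have : 0 ≤ i := by
      rcases (PySem.List.mem_pyRange_iff_of_pos (by norm_num : (0:Int) < 3) i).1 hi with ⟨h1, _⟩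
      exact h1
    exact pv_chunk_len lst i this

theorem pv_rank_fold (t : String) :
    ∀ (l : List String) (s : Int) (d : PySem.Dict String Int), l.Nodup →
      ((PySem.List.enumerate l s).foldl (fun (d : PySem.Dict String Int) it => d.insert it.2 it.1) d).getD t 0
        = if t ∈ l then s + (l.idxOf t : Int) else d.getD t 0
  | [], s, d, _ => by simp [PySem.List.enumerate]
  | y :: ys, s, d, h => by
      simp only [PySem.List.enumerate, List.foldl_cons]
      rw [pv_rank_fold t ys (s + 1) (d.insert y s) (List.Nodup.of_cons h)]
      by_cases hty : t = y
      · subst hty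
        have hnm : t ∉ ys := (List.nodup_cons.1 h).1
        simp [hnm, PySem.Dict.getD_insert_self]
      · by_cases htm : t ∈ ys
        · have : (y :: ys).idxOf t = ys.idxOf t + 1 := List.idxOf_cons_ne ys (fun he => hty he.symm)
          simp only [htm, if_true, List.mem_cons, hty, false_or, this]
          push_cast; ring
        · have hnm : t ∉ y :: ys := by simp [hty, htm]
          simp [htm, hnm, PySem.Dict.getD_insert_of_ne _ _ _ hty]

theorem pv_A_sums (gt : List String) (t : String) :
    (((PySem.List.pyRange 0 (PySem.List.len gt)).foldl
        (fun (d : PySem.Dict String Int) i =>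
          let topic := PySem.List.pyGetD gt i ""
          d.insert topic
            (((pyChunks gt 3).map (fun chunk =>
               if chunk.contains topic then (((PySem.List.index? chunk topic).getD 0 : Nat) : Int) else 0)).sum))
        PySem.Dict.empty).getD t 0) = pvS gt t := by
  rw [PySem.List.foldl_pyRange_pyGetD gt ""
      (fun (d : PySem.Dict String Int) x => d.insert x
        (((pyChunks gt 3).map (fun chunk =>
          if chunk.contains x then (((PySem.List.index? chunk x).getD 0 : Nat) : Int) else 0)).sum))
      PySem.Dict.empty (le_refl 0)]
  rw [Int.toNat_zero, List.drop_zero]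
  rw [pv_foldl_insert_const gt (fun x =>
    ((pyChunks gt 3).map (fun chunk =>
      if chunk.contains x then (((PySem.List.index? chunk x).getD 0 : Nat) : Int) else 0)).sum)
    PySem.Dict.empty t]
  by_cases hm : t ∈ gt
  · simp [hm, pvS]
  · simp [hm, pv_S_of_not_mem gt t hm]

-- ===== VERDICT (by name: the statement is the Claim_ definition above) =====
set_option maxHeartbeats 1600000 in
theorem assign_topic_spec : Claim_equal_assign_topic := by
  intro gt _ hpre
  unfold Pre_assign_topic at hpre
  unfold Spec_assign_topic assign_topic assign_topic_alt
  simp only []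
  rw [PySem.Dict.items_counter gt, PySem.Dict.keys_counter gt]
  set keys : List String := PySem.Set.ofList gt with hkeysdef
  have hnd : keys.Nodup := PySem.Set.nodup_ofList gt
  have hrk : ∀ t ∈ keys, ((PySem.List.enumerate keys).foldl
      (fun (d : PySem.Dict String Int) it => d.insert it.2 it.1) PySem.Dict.empty).getD t 0
      = (keys.idxOf t : Int) := by
    intro t ht
    rw [pv_rank_fold t keys 0 PySem.Dict.empty hnd]
    simp [ht]
  have hr : keys.Pairwise (fun a b =>
      ((PySem.List.enumerate keys).foldl (fun (d : PySem.Dict String Int) it => d.insert it.2 it.1)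
        PySem.Dict.empty).getD a 0
      < ((PySem.List.enumerate keys).foldl (fun (d : PySem.Dict String Int) it => d.insert it.2 it.1)
        PySem.Dict.empty).getD b 0) := by
    refine List.Pairwise.imp_of_mem ?_ (pv_pairwise_idxOf keys hnd)
    intro a b ha hb hab
    rw [hrk a ha, hrk b hb]
    exact_mod_cast hab
  have hsort := pv_sort_eq (fun k => ((List.count k gt : Nat) : Int))
      (fun t => ((PySem.List.enumerate keys).foldl (fun (d : PySem.Dict String Int) it => d.insert it.2 it.1)
        PySem.Dict.empty).getD t 0) keys hr
  simp only [] at hsort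
  rw [hsort]
  have hcg : (fun t => -((PySem.Dict.counter gt).getD t 0)) = (fun k => -((List.count k gt : Nat) : Int)) := by
    funext t; rw [PySem.Dict.getD_counter]
  rw [hcg]
  set O : List String := PySem.List.sorted2 keys (fun k => -((List.count k gt : Nat) : Int))
      (fun t => ((PySem.List.enumerate keys).foldl (fun (d : PySem.Dict String Int) it => d.insert it.2 it.1)
        PySem.Dict.empty).getD t 0) with hOdef
  have hlen : O.length = keys.length := (PySem.List.sorted2_perm _ _ _ _).length_eq
  obtain ⟨t0, t1, rest, hO⟩ : ∃ a b l, O = a :: b :: l := by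
    rcases hOc : O with _ | ⟨a, _ | ⟨b, l⟩⟩
    · rw [hOc] at hlen; simp at hlen; omega
    · rw [hOc] at hlen; simp at hlen; omega
    · exact ⟨a, b, l, rfl⟩
  rw [hO]
  simp only [List.map_cons, List.take_succ_cons, List.take_zero, pv_pyGet0, pv_pyGet1,
    Option.getD_some, PySem.Dict.getD_counter]
  by_cases hc : ((List.count t0 gt : Nat) : Int) = ((List.count t1 gt : Nat) : Int)
  · simp only [hc, beq_self_eq_true, if_true]
    have hA : (fun t => (((PySem.List.pyRange 0 (PySem.List.len gt)).foldl
        (fun (d : PySem.Dict String Int) i =>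
          let topic := PySem.List.pyGetD gt i ""
          d.insert topic
            (((pyChunks gt 3).map (fun chunk =>
               if chunk.contains topic then (((PySem.List.index? chunk topic).getD 0 : Nat) : Int) else 0)).sum))
        PySem.Dict.empty).getD t 0)) = fun t => pvS gt t := funext (pv_A_sums gt)
    have hB : (fun t => (((PySem.List.pyRange 0 (PySem.List.len gt) 3).foldl
      (fun (d : PySem.Dict String Int) start =>
        let chunk := PySem.List.slice gt (some start) (some (start + 3))
        (PySem.List.enumerate chunk).foldl
          (fun (d : PySem.Dict String Int) jt =>
            if (PySem.List.slice chunk none (some jt.1)).contains jt.2 then d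
            else d.insert jt.2 (d.getD jt.2 0 + jt.1)) d)
      PySem.Dict.empty).getD t 0)) = fun t => pvS gt t := funext (pv_B_sums gt)
    rw [hA, hB]
    rw [← List.map_take]
    simp [List.map_map, Function.comp_def]
  · have hc' : (((List.count t0 gt : Nat) : Int) == ((List.count t1 gt : Nat) : Int)) = false := by
      simp [hc]
    simp [hc']
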